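-- pv_equiv track=rewrite | github.com/MuhammadUmerKhan/AI-Powered-Autonomous-AI-Agent-for-Enterprise-Workflows | clause_extractor.py | merge_clause_chunks
-- ===== SOURCE A (Python) =====
-- from typing import Dict, Optional, List
-- from collections import defaultdict
--
-- def merge_clause_chunks(chunk_outputs: List[Dict[str, str]]) -> Dict[str, str]:
--     final_clauses = defaultdict(str)
--
--     for chunk in chunk_outputs:
--         for clause, value in chunk.items():
--             if final_clauses[clause] == "":  # Only keep the first found instance
--                 if value and value != "Not Found":
--                     final_clauses[clause] = value
--
--     # Fill missing clauses with "Not Found"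
--     for clause in final_clauses:
--         if not final_clauses[clause]:
--             final_clauses[clause] = "Not Found"
--
--     return dict(final_clauses)
-- ===== SOURCE B (Python) =====
-- from typing import Dict, List
--
--
-- def _first_valid(chunk_outputs: List[Dict[str, str]], clause: str) -> str:
--     for chunk in chunk_outputs:
--         v = chunk.get(clause)
--         if v and v != "Not Found":
--             return v
--     return "Not Found"
--
--
-- def merge_clause_chunks(chunk_outputs: List[Dict[str, str]]) -> Dict[str, str]:
--     # Pass 1: ordered list of distinct clause names (first appearance order).
--     clauses = []
--     seen = set()
--     for chunk in chunk_outputs: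
--         for clause in chunk:
--             if clause not in seen:
--                 seen.add(clause)
--                 clauses.append(clause)
--     # Pass 2: per clause, rescan the chunks for the first valid value.
--     return {clause: _first_valid(chunk_outputs, clause) for clause in clauses}
-- ===== Notes on version B (the rewrite author's own statement) =====
-- stated objective: alternative
-- what changed: A single accumulating defaultdict pass is replaced by an index-then-rescan decomposition: first collect the distinct clause names in first-appearance order, then for each clause rescan the chunks for the first value that is non-empty and not 'Not Found' (defaulting to 'Not Found'), building the result as a dict comprehension.
import Mathlib
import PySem

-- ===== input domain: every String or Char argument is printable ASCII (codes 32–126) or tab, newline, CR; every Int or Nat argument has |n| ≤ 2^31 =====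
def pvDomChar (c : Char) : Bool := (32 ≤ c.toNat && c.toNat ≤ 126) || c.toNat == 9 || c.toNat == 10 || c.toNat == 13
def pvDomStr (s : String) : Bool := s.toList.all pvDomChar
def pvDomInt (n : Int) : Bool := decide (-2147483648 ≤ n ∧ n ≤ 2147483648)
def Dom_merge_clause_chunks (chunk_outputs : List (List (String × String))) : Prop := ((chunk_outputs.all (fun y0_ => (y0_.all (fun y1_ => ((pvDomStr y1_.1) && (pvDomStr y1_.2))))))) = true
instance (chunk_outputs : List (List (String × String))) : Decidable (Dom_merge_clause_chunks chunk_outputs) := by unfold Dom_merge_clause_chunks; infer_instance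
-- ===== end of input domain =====

-- B replaces A's single accumulating defaultdict pass by an index-then-rescan decomposition
-- (collect distinct clause names in first-appearance order, then per clause take the first
-- valid value by rescanning the chunks); objective: alternative, not faster.

-- ===== PORT A =====
-- Each inner association list stands for a Python dict: Dict.ofList (duplicate keys: last
-- value wins, first position kept), .items iterates it.
def merge_clause_chunks (chunk_outputs : List (List (String × String))) : List (String × String) :=
  let final : PySem.Dict String String :=
    chunk_outputs.foldl (fun final chunk =>
      (PySem.Dict.ofList chunk).items.foldl (fun f p =>
        -- 'final_clauses[clause]' on defaultdict(str) inserts "" on a miss, then reads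
        let cur := f.getD p.1 ""
        let f := f.insert p.1 cur
        if cur == "" then
          if p.2 != "" && p.2 != "Not Found" then f.insert p.1 p.2 else f
        else f) final)
      PySem.Dict.empty
  -- 'for clause in final_clauses: if not final_clauses[clause]: …' overwrites each empty
  -- value in place, order preserved: a pointwise update of the items; dict(…) returns them.
  final.items.map (fun p => (p.1, if p.2 == "" then "Not Found" else p.2))

-- ===== PORT B =====
-- '_first_valid': scan the chunks, return the first valid value for this clause (early return).
def pvFirstValid (chunk_outputs : List (List (String × String))) (clause : String) : String :=
  match chunk_outputs with
  | [] => "Not Found"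
  | chunk :: rest =>
    match (PySem.Dict.ofList chunk).get? clause with
    | some v => if v != "" && v != "Not Found" then v else pvFirstValid rest clause
    | none => pvFirstValid rest clause

def merge_clause_chunks_alt (chunk_outputs : List (List (String × String))) : List (String × String) :=
  -- Pass 1: clauses list + seen set, first-appearance order.
  let st : List String × PySem.Set String :=
    chunk_outputs.foldl (fun st chunk =>
      (PySem.Dict.ofList chunk).keys.foldl (fun st clause =>
        if PySem.Set.contains st.2 clause then st
        else (st.1 ++ [clause], PySem.Set.add st.2 clause)) st)
      ([], PySem.Set.empty)
  -- Pass 2: dict comprehension {clause: _first_valid(...) for clause in clauses}.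
  (st.1.foldl (fun (res : PySem.Dict String String) clause =>
      res.insert clause (pvFirstValid chunk_outputs clause)) PySem.Dict.empty).items

-- ===== PRECONDITION & SPEC =====
def Spec_merge_clause_chunks (chunk_outputs : List (List (String × String))) (out : List (String × String)) : Prop := out = merge_clause_chunks_alt chunk_outputs
instance (chunk_outputs : List (List (String × String))) (out : List (String × String)) : Decidable (Spec_merge_clause_chunks chunk_outputs out) := by unfold Spec_merge_clause_chunks; infer_instance

-- ===== CLAIM (what is proved, stated in full; the proofs are below) =====
def Claim_equal_merge_clause_chunks : Prop := ∀ (chunk_outputs : List (List (String × String))), Dom_merge_clause_chunks chunk_outputs → Spec_merge_clause_chunks chunk_outputs (merge_clause_chunks chunk_outputs)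

-- ===== LEMMAS AND PROOFS =====

-- validity test shared by the abstract description
def pvVal (v : String) : Bool := v != "" && v != "Not Found"

-- first valid value for key k in a flat pair stream ("" if none)
def pvFv : List (String × String) → String → String
  | [], _ => ""
  | p :: L, k => if p.1 == k && pvVal p.2 then p.2 else pvFv L k

def pvKeysStep (ks : List String) (k : String) : List String :=
  if ks.contains k then ks else ks ++ [k]

def pvStepA (f : PySem.Dict String String) (p : String × String) : PySem.Dict String String :=
  let cur := f.getD p.1 ""
  let f := f.insert p.1 cur
  if cur == "" then
    if p.2 != "" && p.2 != "Not Found" then f.insert p.1 p.2 else f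
  else f

def pvL (chunk_outputs : List (List (String × String))) : List (String × String) :=
  (chunk_outputs.map (fun c => (PySem.Dict.ofList c).items)).flatten

def pvKeys (L : List (String × String)) : List String := (L.map Prod.fst).foldl pvKeysStep []

def pvF (L : List (String × String)) : List (String × String) :=
  (pvKeys L).map (fun k => (k, pvFv L k))

theorem pvFoldl_flatten {α β γ : Type} (xs : List α) (g : α → List β)
    (step : γ → β → γ) (init : γ) :
    xs.foldl (fun acc x => (g x).foldl step acc) init
      = ((xs.map g).flatten).foldl step init := by
  induction xs generalizing init with
  | nil => rfl
  | cons x xs ih => simp [List.foldl_append, ih]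

theorem pvMem_foldl_keysStep (M : List String) (ks : List String) (x : String) :
    x ∈ M.foldl pvKeysStep ks ↔ x ∈ ks ∨ x ∈ M := by
  induction M generalizing ks with
  | nil => simp
  | cons m M ih =>
    by_cases h : m ∈ ks
    · simp only [List.foldl_cons, pvKeysStep]
      rw [if_pos (by simpa using h)]
      rw [ih]
      aesop
    · simp only [List.foldl_cons, pvKeysStep]
      rw [if_neg (by simpa using h)]
      rw [ih]
      simp
      tauto

theorem pvNodup_foldl_keysStep (M : List String) (ks : List String) (h : ks.Nodup) :
    (M.foldl pvKeysStep ks).Nodup := by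
  induction M generalizing ks with
  | nil => exact h
  | cons m M ih =>
    by_cases hm : m ∈ ks
    · simp only [List.foldl_cons, pvKeysStep]
      rw [if_pos (by simpa using hm)]
      exact ih ks h
    · simp only [List.foldl_cons, pvKeysStep]
      rw [if_neg (by simpa using hm)]
      exact ih _ (by
        simp [List.nodup_append, h]
        intro a ha hae
        exact hm (hae ▸ ha))

theorem pvFv_not_mem (L : List (String × String)) (k : String)
    (h : k ∉ L.map Prod.fst) : pvFv L k = "" := by
  induction L with
  | nil => rfl
  | cons p L ih =>
    simp only [List.map_cons, List.mem_cons, not_or] at h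
    simp [pvFv, beq_iff_eq, Ne.symm h.1, ih h.2]

theorem pvVal_ne_empty {v : String} (h : pvVal v = true) : v ≠ "" := by
  simp [pvVal] at h; exact h.1

theorem pvFv_append (l rest : List (String × String)) (k : String) :
    pvFv (l ++ rest) k = if pvFv l k == "" then pvFv rest k else pvFv l k := by
  induction l with
  | nil => simp [pvFv]
  | cons p l ih =>
    by_cases h : (p.1 == k && pvVal p.2) = true
    · have h2 : pvVal p.2 = true := ((Bool.and_eq_true _ _).mp h).2
      have hne : p.2 ≠ "" := pvVal_ne_empty h2
      simp [pvFv, h, hne]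
    · simp [pvFv, h, ih]

theorem pvKeys_append_singleton (L : List (String × String)) (p : String × String) :
    pvKeys (L ++ [p]) = pvKeysStep (pvKeys L) p.1 := by
  simp [pvKeys, List.foldl_append]

theorem pvMem_keys_iff (L : List (String × String)) (k : String) :
    k ∈ pvKeys L ↔ k ∈ L.map Prod.fst := by
  simpa using pvMem_foldl_keysStep (L.map Prod.fst) [] k

theorem pvNodup_keys (L : List (String × String)) : (pvKeys L).Nodup :=
  pvNodup_foldl_keysStep _ _ List.nodup_nil

theorem pvKeys_of_mkF (L : List (String × String)) :
    (PySem.Dict.mk (pvF L)).keys = pvKeys L := by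
  simp only [PySem.Dict.keys, pvF, List.map_map]
  have : ((fun x : String × String => x.1) ∘ fun k => (k, pvFv L k)) = id := rfl
  simp [this]

theorem pvFv_append_single (L : List (String × String)) (k v k' : String) :
    pvFv (L ++ [(k, v)]) k'
      = if pvFv L k' == "" then (if k == k' && pvVal v then v else "") else pvFv L k' := by
  rw [pvFv_append]; rfl

theorem pvContains_mkF (L : List (String × String)) (k : String) :
    (PySem.Dict.mk (pvF L)).contains k = decide (k ∈ pvKeys L) := by
  rw [PySem.Dict.contains_eq_decide_mem_keys, pvKeys_of_mkF]

theorem pvInsert_overwrite (L : List (String × String)) (k v : String) (hk : k ∈ pvKeys L) :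
    ((PySem.Dict.mk (pvF L)).insert k v).items
      = (pvKeys L).map (fun k' => (k', if k' == k then v else pvFv L k')) := by
  rw [PySem.Dict.items_insert_of_contains _ _ (by rw [pvContains_mkF]; simpa using hk)]
  show (pvF L).map _ = _
  simp only [pvF, List.map_map]
  apply List.map_congr_left
  intro k' _
  by_cases h : k' = k
  · subst h; simp
  · simp [h]

theorem pvStepA_mk (L : List (String × String)) (p : String × String) :
    (pvStepA (PySem.Dict.mk (pvF L)) p).items = pvF (L ++ [p]) := by
  obtain ⟨k, v⟩ := p
  have hnd := pvNodup_keys L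
  by_cases hk : k ∈ pvKeys L
  · -- key already present
    have hcur : (PySem.Dict.mk (pvF L)).getD k "" = pvFv L k := by
      apply PySem.Dict.getD_of_mem_items
      · exact List.mem_map.mpr ⟨k, hk, rfl⟩
      · rw [pvKeys_of_mkF]; exact hnd
    have hins1 : (PySem.Dict.mk (pvF L)).insert k (pvFv L k) = PySem.Dict.mk (pvF L) := by
      apply PySem.Dict.ext
      rw [pvInsert_overwrite L k _ hk]
      show _ = pvF L
      simp only [pvF]
      apply List.map_congr_left
      intro k' _
      by_cases h : k' = k
      · subst h; simp
      · simp [h]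
    have hkeys' : pvKeys (L ++ [(k, v)]) = pvKeys L := by
      rw [pvKeys_append_singleton]
      simp only [pvKeysStep]
      rw [if_pos (by simpa using hk)]
    show ((fun f : PySem.Dict String String =>
        if (PySem.Dict.mk (pvF L)).getD k "" == "" then
          if v != "" && v != "Not Found" then f.insert k v else f
        else f) ((PySem.Dict.mk (pvF L)).insert k ((PySem.Dict.mk (pvF L)).getD k ""))).items = _
    rw [hcur, hins1]
    beta_reduce
    by_cases hcur0 : pvFv L k = ""
    · rw [if_pos (by simpa using hcur0)]
      by_cases hv : pvVal v = true
      · rw [if_pos (by simpa [pvVal] using hv)]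
        rw [pvInsert_overwrite L k v hk]
        simp only [pvF, hkeys']
        apply List.map_congr_left
        intro k' _
        rw [pvFv_append_single]
        by_cases h : k' = k
        · subst h; simp [hcur0, hv]
        · simp only [beq_iff_eq, h, if_false]
          have : (k == k') = false := by simp [Ne.symm h]
          simp only [this, Bool.false_and]
          by_cases h0 : pvFv L k' = "" <;> simp [h0]
      · rw [if_neg (by simpa [pvVal] using hv)]
        show pvF L = _
        simp only [pvF, hkeys']
        apply List.map_congr_left
        intro k' _
        rw [pvFv_append_single]
        by_cases h : k' = k
        · subst h; simp [hcur0, hv]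
        · have : (k == k') = false := by simp [Ne.symm h]
          simp only [this, Bool.false_and]
          by_cases h0 : pvFv L k' = "" <;> simp [h0]
    · rw [if_neg (by simpa using hcur0)]
      show pvF L = _
      simp only [pvF, hkeys']
      apply List.map_congr_left
      intro k' _
      rw [pvFv_append_single]
      by_cases h : k' = k
      · subst h; simp [hcur0]
      · have : (k == k') = false := by simp [Ne.symm h]
        simp only [this, Bool.false_and]
        by_cases h0 : pvFv L k' = "" <;> simp [h0]
  · -- fresh key
    have hcont : (PySem.Dict.mk (pvF L)).contains k = false := by
      rw [pvContains_mkF]; simp [hk]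
    have hcur : (PySem.Dict.mk (pvF L)).getD k "" = "" :=
      PySem.Dict.getD_of_not_contains _ _ hcont
    have hfvk : pvFv L k = "" := by
      apply pvFv_not_mem
      intro hmem
      exact hk ((pvMem_keys_iff L k).mpr hmem)
    have hins1 : (PySem.Dict.mk (pvF L)).insert k ""
        = PySem.Dict.mk (pvF L ++ [(k, "")]) := by
      apply PySem.Dict.ext
      rw [PySem.Dict.items_insert_of_not_contains _ _ hcont]
    have hkeys' : pvKeys (L ++ [(k, v)]) = pvKeys L ++ [k] := by
      rw [pvKeys_append_singleton]
      simp only [pvKeysStep]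
      rw [if_neg (by simpa using hk)]
    have hrhs : pvF (L ++ [(k, v)])
        = pvF L ++ [(k, if pvVal v then v else "")] := by
      simp only [pvF, hkeys', List.map_append, List.map_cons, List.map_nil]
      congr 1
      · apply List.map_congr_left
        intro k' hk'
        have h : k' ≠ k := fun he => hk (he ▸ hk')
        rw [pvFv_append_single]
        have : (k == k') = false := by simp [Ne.symm h]
        simp only [this, Bool.false_and]
        by_cases h0 : pvFv L k' = "" <;> simp [h0]
      · rw [pvFv_append_single]
        simp [hfvk]
    show ((fun f : PySem.Dict String String =>
        if (PySem.Dict.mk (pvF L)).getD k "" == "" then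
          if v != "" && v != "Not Found" then f.insert k v else f
        else f) ((PySem.Dict.mk (pvF L)).insert k ((PySem.Dict.mk (pvF L)).getD k ""))).items = _
    rw [hcur, hins1]
    beta_reduce
    rw [if_pos (by simp)]
    by_cases hv : pvVal v = true
    · rw [if_pos (by simpa [pvVal] using hv)]
      have hcont2 : (PySem.Dict.mk (pvF L ++ [(k, "")])).contains k = true := by
        rw [PySem.Dict.contains_eq_decide_mem_keys]
        simp [PySem.Dict.keys]
      rw [PySem.Dict.items_insert_of_contains _ _ hcont2, hrhs, if_pos hv]
      show (pvF L ++ [(k, "")]).map _ = _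
      rw [List.map_append]
      congr 1
      · conv_rhs => rw [← List.map_id (pvF L)]
        apply List.map_congr_left
        intro p hp
        obtain ⟨k', hk', rfl⟩ := List.mem_map.mp hp
        have h : k' ≠ k := fun he => hk (he ▸ hk')
        simp [h]
      · simp
    · rw [if_neg (by simpa [pvVal] using hv)]
      rw [hrhs, if_neg hv]

theorem pvFoldA_items (L : List (String × String)) :
    (L.foldl pvStepA PySem.Dict.empty).items = pvF L := by
  induction L using List.reverseRecOn with
  | nil => rfl
  | append_singleton L p ih =>
    rw [List.foldl_append, List.foldl_cons, List.foldl_nil]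
    have : L.foldl pvStepA PySem.Dict.empty = PySem.Dict.mk (pvF L) := by
      apply PySem.Dict.ext; simpa using ih
    rw [this, pvStepA_mk]

theorem pvFv_mk_get? (l rest : List (String × String)) (k : String)
    (h : (l.map Prod.fst).Nodup) :
    pvFv (l ++ rest) k
      = (match (PySem.Dict.mk l).get? k with
         | some v => if pvVal v then v else pvFv rest k
         | none => pvFv rest k) := by
  induction l with
  | nil => rfl
  | cons p l ih =>
    obtain ⟨k', v'⟩ := p
    simp only [List.map_cons, List.nodup_cons] at h
    rw [PySem.Dict.get?_mk_cons]
    by_cases he : k' = k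
    · subst he
      simp only [beq_self_eq_true, if_true]
      show (if (k' == k' && pvVal v') = true then v' else pvFv (l ++ rest) k') = _
      by_cases hv : pvVal v' = true
      · simp [hv]
      · simp only [hv, Bool.and_false]
        rw [pvFv_append, pvFv_not_mem l k' h.1]
        simp
    · have hne : (k' == k) = false := by simp [he]
      show (if (k' == k && pvVal v') = true then v' else pvFv (l ++ rest) k) = _
      simp only [hne, Bool.false_and]
      exact ih h.2

theorem pvFirstValid_eq (chunk_outputs : List (List (String × String))) (k : String) :
    pvFirstValid chunk_outputs k
      = (if pvFv (pvL chunk_outputs) k == "" then "Not Found" else pvFv (pvL chunk_outputs) k) := by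
  induction chunk_outputs with
  | nil => rfl
  | cons c rest ih =>
    have hL : pvL (c :: rest) = (PySem.Dict.ofList c).items ++ pvL rest := by
      simp [pvL]
    have hnd : ((PySem.Dict.ofList c).items.map Prod.fst).Nodup :=
      PySem.Dict.nodup_keys_ofList c
    rw [hL, pvFv_mk_get? _ _ _ hnd]
    show (match (PySem.Dict.ofList c).get? k with
          | some v => if v != "" && v != "Not Found" then v else pvFirstValid rest k
          | none => pvFirstValid rest k) = _
    cases hget : (PySem.Dict.ofList c).get? k with
    | none => simpa using ih
    | some v =>
      show (if pvVal v = true then v else pvFirstValid rest k) = _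
      by_cases hv : pvVal v = true
      · have : v ≠ "" := pvVal_ne_empty hv
        simp [hv, this]
      · simpa [hv] using ih

-- ===== VERDICT (by name: the statement is the Claim_ definition above) =====
theorem pvA_eq (chunk_outputs : List (List (String × String))) :
    merge_clause_chunks chunk_outputs
      = (pvKeys (pvL chunk_outputs)).map
          (fun k => (k, pvFirstValid chunk_outputs k)) := by
  show ((chunk_outputs.foldl (fun final chunk =>
      (PySem.Dict.ofList chunk).items.foldl pvStepA final) PySem.Dict.empty).items).map
      (fun p => (p.1, if p.2 == "" then "Not Found" else p.2)) = _
  rw [pvFoldl_flatten chunk_outputs (fun c => (PySem.Dict.ofList c).items) pvStepA PySem.Dict.empty]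
  rw [show ((chunk_outputs.map (fun c => (PySem.Dict.ofList c).items)).flatten) = pvL chunk_outputs from rfl]
  rw [pvFoldA_items, pvF, List.map_map]
  apply List.map_congr_left
  intro k _
  rw [pvFirstValid_eq]
  rfl

theorem pvStep2_eq (M : List String) (ks : List String) (hnd : ks.Nodup) :
    M.foldl (fun (st : List String × PySem.Set String) clause =>
        if PySem.Set.contains st.2 clause then st
        else (st.1 ++ [clause], PySem.Set.add st.2 clause)) (ks, ks)
      = (M.foldl pvKeysStep ks, M.foldl pvKeysStep ks) := by
  induction M generalizing ks with
  | nil => rfl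
  | cons m M ih =>
    simp only [List.foldl_cons, pvKeysStep]
    by_cases hm : m ∈ ks
    · rw [if_pos ((PySem.Set.contains_iff _ _).mpr hm), if_pos (by simpa using hm)]
      exact ih ks hnd
    · rw [if_neg (fun h => hm ((PySem.Set.contains_iff _ _).mp h)),
          if_neg (by simpa using hm)]
      rw [PySem.Set.add_of_not_mem hm]
      exact ih _ (by
        simp [List.nodup_append, hnd]
        intro a ha hae
        exact hm (hae ▸ ha))

theorem pvB_eq (chunk_outputs : List (List (String × String))) :
    merge_clause_chunks_alt chunk_outputs
      = (pvKeys (pvL chunk_outputs)).map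
          (fun k => (k, pvFirstValid chunk_outputs k)) := by
  show ((chunk_outputs.foldl (fun (st : List String × PySem.Set String) chunk =>
      (PySem.Dict.ofList chunk).keys.foldl (fun st clause =>
        if PySem.Set.contains st.2 clause then st
        else (st.1 ++ [clause], PySem.Set.add st.2 clause)) st)
      ([], PySem.Set.empty)).1.foldl (fun (res : PySem.Dict String String) clause =>
        res.insert clause (pvFirstValid chunk_outputs clause)) PySem.Dict.empty).items = _
  rw [pvFoldl_flatten chunk_outputs (fun c => (PySem.Dict.ofList c).keys)]
  have hempty : (([], PySem.Set.empty) : List String × PySem.Set String)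
      = (([] : List String), ([] : List String)) := rfl
  rw [hempty, pvStep2_eq _ _ List.nodup_nil]
  have hflat : ((chunk_outputs.map (fun c => (PySem.Dict.ofList c).keys)).flatten)
      = (pvL chunk_outputs).map Prod.fst := by
    simp only [pvL, PySem.Dict.keys, List.map_flatten, List.map_map]
    rfl
  rw [hflat]
  have hkeys : ((pvL chunk_outputs).map Prod.fst).foldl pvKeysStep [] = pvKeys (pvL chunk_outputs) := rfl
  rw [hkeys]
  have hnd := pvNodup_keys (pvL chunk_outputs)
  show ((pvKeys (pvL chunk_outputs)).foldl (fun res clause =>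
      res.insert clause (pvFirstValid chunk_outputs clause)) PySem.Dict.empty).items = _
  rw [PySem.Dict.items_foldl_insert_fresh (pvKeys (pvL chunk_outputs))
      (fun clause => clause) (fun clause => pvFirstValid chunk_outputs clause)
      PySem.Dict.empty (fun a _ => PySem.Dict.contains_empty a) (by simpa using hnd)]
  rfl

theorem merge_clause_chunks_spec : Claim_equal_merge_clause_chunks := by
  intro chunk_outputs _
  unfold Spec_merge_clause_chunks
  rw [pvA_eq, pvB_eq]
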